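-- pv_equiv track=rewrite | github.com/hoseinerfan/Clean_M3DocRAG | scripts/rerank_target_docs_visual_aware.py | _infer_spatial_quadrant_groups
-- ===== SOURCE A (Python) =====
-- def _infer_spatial_quadrant_groups(page_token_count: int) -> tuple[int, list[list[int]]]:
--     prefix_tokens, grid_side = infer_patch_grid(page_token_count)
--     if grid_side < 2:
--         return prefix_tokens, []
--
--     row_mid = grid_side // 2
--     col_mid = grid_side // 2
--     quadrants = [[] for _ in range(4)]
--
--     for row in range(grid_side):
--         for col in range(grid_side):
--             quadrant_idx = 0
--             if row >= row_mid:
--                 quadrant_idx += 2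
--             if col >= col_mid:
--                 quadrant_idx += 1
--             quadrants[quadrant_idx].append(prefix_tokens + row * grid_side + col)
--
--     return prefix_tokens, [group for group in quadrants if group]
--
-- def infer_patch_grid(page_token_count: int) -> tuple[int, int]:
--     for side in range(int(page_token_count**0.5), 0, -1):
--         patch_count = side * side
--         if patch_count <= page_token_count:
--             prefix_tokens = page_token_count - patch_count
--             if prefix_tokens >= 0:
--                 return prefix_tokens, side
--     raise ValueError(f"Unable to infer patch grid from page_token_count={page_token_count}")
-- ===== SOURCE B (Python) =====
-- def infer_patch_grid(page_token_count: int) -> tuple[int, int]: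
--     for side in range(int(page_token_count**0.5), 0, -1):
--         patch_count = side * side
--         if patch_count <= page_token_count:
--             prefix_tokens = page_token_count - patch_count
--             if prefix_tokens >= 0:
--                 return prefix_tokens, side
--     raise ValueError(f"Unable to infer patch grid from page_token_count={page_token_count}")
--
-- def _infer_spatial_quadrant_groups(page_token_count: int) -> tuple[int, list[list[int]]]:
--     prefix_tokens, grid_side = infer_patch_grid(page_token_count)
--     if grid_side < 2:
--         return prefix_tokens, []
--
--     mid = grid_side // 2
--
--     def rect(rows, cols):
--         return [prefix_tokens + row * grid_side + col for row in rows for col in cols]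
--
--     top, bottom = range(0, mid), range(mid, grid_side)
--     left, right = range(0, mid), range(mid, grid_side)
--     # grid_side >= 2 makes every quadrant non-empty, so all four are returned.
--     return prefix_tokens, [rect(top, left), rect(top, right),
--                            rect(bottom, left), rect(bottom, right)]
-- ===== Notes on version B (the rewrite author's own statement) =====
-- stated objective: simpler
-- what changed: B builds each of the four quadrants directly as a row-major comprehension over its own (row-range, col-range) rectangle, instead of scanning the whole grid once and classifying every cell into a quadrant bucket and then filtering empty buckets.
import Mathlib
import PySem

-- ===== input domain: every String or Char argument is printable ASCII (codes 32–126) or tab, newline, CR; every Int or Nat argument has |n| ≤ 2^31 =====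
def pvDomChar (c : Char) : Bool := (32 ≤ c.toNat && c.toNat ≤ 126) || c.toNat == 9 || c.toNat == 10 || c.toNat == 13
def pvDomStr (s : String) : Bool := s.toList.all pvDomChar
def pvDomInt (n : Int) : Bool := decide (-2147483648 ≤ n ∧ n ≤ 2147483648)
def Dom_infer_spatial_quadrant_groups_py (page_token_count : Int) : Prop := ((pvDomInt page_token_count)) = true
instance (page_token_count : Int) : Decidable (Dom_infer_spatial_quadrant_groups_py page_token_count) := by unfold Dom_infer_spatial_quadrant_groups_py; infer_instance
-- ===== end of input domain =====

-- B builds the four quadrants directly as row-major rectangle comprehensions instead of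
-- classifying every grid cell into a bucket and filtering empty buckets (objective: simpler).


-- ===== PORT A =====
-- Helper infer_patch_grid, shared verbatim by both Pythons. `int(n**0.5)` is ported as
-- Nat.sqrt n.toNat, exact for 0 ≤ n ≤ 2^31 (checked against CPython on that whole range);
-- for n < 0 Python raises TypeError before the loop: there Nat.sqrt n.toNat = 0, the
-- countdown range is empty and this helper returns none (none = the ValueError/TypeError,
-- excluded by Pre_).
def infer_patch_grid_py (page_token_count : Int) : Option (Int × Int) :=
  (PySem.List.pyRange ((Nat.sqrt page_token_count.toNat : Nat) : Int) 0 (-1)).findSome?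
    (fun side =>
      let patch_count := side * side
      if patch_count ≤ page_token_count then
        let prefix_tokens := page_token_count - patch_count
        if 0 ≤ prefix_tokens then some (prefix_tokens, side) else none
      else none)

def infer_spatial_quadrant_groups_py (page_token_count : Int) : Int × List (List Int) :=
  match infer_patch_grid_py page_token_count with
  | none => (0, [])   -- unreachable under Pre_: infer_patch_grid raises here
  | some (prefix_tokens, grid_side) =>
    if grid_side < 2 then (prefix_tokens, [])
    else
      let row_mid := PySem.Int.floordiv grid_side 2
      let col_mid := PySem.Int.floordiv grid_side 2
      let quadrants : List (List Int) :=
        (PySem.List.pyRange 0 grid_side 1).foldl (fun qs row =>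
          (PySem.List.pyRange 0 grid_side 1).foldl (fun qs col =>
            qs.modify ((if row_mid ≤ row then 2 else 0) + (if col_mid ≤ col then 1 else 0))
              (fun q => q ++ [prefix_tokens + row * grid_side + col])) qs)
          [[], [], [], []]
      (prefix_tokens, quadrants.filter (fun group => !group.isEmpty))

-- ===== PORT B =====
-- rect(rows, cols) from Source B: row-major comprehension over one rectangle
def pvRect (p g r0 r1 c0 c1 : Int) : List Int :=
  (PySem.List.pyRange r0 r1 1).flatMap (fun row =>
    (PySem.List.pyRange c0 c1 1).map (fun col => p + row * g + col))

def infer_spatial_quadrant_groups_py_alt (page_token_count : Int) : Int × List (List Int) :=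
  match infer_patch_grid_py page_token_count with
  | none => (0, [])   -- unreachable under Pre_: infer_patch_grid raises here
  | some (prefix_tokens, grid_side) =>
    if grid_side < 2 then (prefix_tokens, [])
    else
      let mid := PySem.Int.floordiv grid_side 2
      (prefix_tokens,
        [pvRect prefix_tokens grid_side 0 mid 0 mid,
         pvRect prefix_tokens grid_side 0 mid mid grid_side,
         pvRect prefix_tokens grid_side mid grid_side 0 mid,
         pvRect prefix_tokens grid_side mid grid_side mid grid_side])

-- ===== PRECONDITION & SPEC =====
-- Pre_ excludes page_token_count < 1, exactly where Python A raises
-- (ValueError for 0, TypeError for negatives); B raises there too.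
def Pre_infer_spatial_quadrant_groups_py (page_token_count : Int) : Prop :=
  1 ≤ page_token_count
instance (page_token_count : Int) : Decidable (Pre_infer_spatial_quadrant_groups_py page_token_count) := by unfold Pre_infer_spatial_quadrant_groups_py; infer_instance
def pvWitness_infer_spatial_quadrant_groups_py : Int := 11

def Spec_infer_spatial_quadrant_groups_py (page_token_count : Int) (out : Int × List (List Int)) : Prop := out = infer_spatial_quadrant_groups_py_alt page_token_count
instance (page_token_count : Int) (out : Int × List (List Int)) : Decidable (Spec_infer_spatial_quadrant_groups_py page_token_count out) := by unfold Spec_infer_spatial_quadrant_groups_py; infer_instance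

-- ===== CLAIM (what is proved, stated in full; the proofs are below) =====
def Claim_equal_infer_spatial_quadrant_groups_py : Prop := ∀ (page_token_count : Int), Dom_infer_spatial_quadrant_groups_py page_token_count → Pre_infer_spatial_quadrant_groups_py page_token_count → Spec_infer_spatial_quadrant_groups_py page_token_count (infer_spatial_quadrant_groups_py page_token_count)

-- ===== LEMMAS AND PROOFS =====

-- A fold that always appends to bucket j just appends the mapped list to bucket j.
theorem pv_foldl_modify_const (L : List Int) (j : Nat) (f : Int → Int) (qs : List (List Int)) :
    L.foldl (fun s c => s.modify j (fun q => q ++ [f c])) qs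
      = qs.modify j (fun q => q ++ L.map f) := by
  induction L generalizing qs with
  | nil =>
      simp only [List.foldl_nil, List.map_nil]
      simp only [List.append_nil]
      exact (List.modify_id j qs).symm
  | cons c L ih =>
      rw [List.foldl_cons, ih, List.modify_modify_eq]
      congr 1
      funext q
      simp

-- One inner column pass, row in the TOP half.
theorem pv_inner_top (g m p row : Int) (h0 : 0 ≤ m) (hmg : m ≤ g) (hrow : ¬ m ≤ row)
    (a b c d : List Int) :
    (PySem.List.pyRange 0 g 1).foldl (fun qs col =>
        qs.modify ((if m ≤ row then 2 else 0) + (if m ≤ col then 1 else 0))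
          (fun q => q ++ [p + row * g + col])) [a, b, c, d]
      = [a ++ (PySem.List.pyRange 0 m 1).map (fun col => p + row * g + col),
         b ++ (PySem.List.pyRange m g 1).map (fun col => p + row * g + col), c, d] := by
  have hL : ∀ s : List (List Int),
      (PySem.List.pyRange 0 m 1).foldl (fun qs col =>
          qs.modify ((if m ≤ row then 2 else 0) + (if m ≤ col then 1 else 0))
            (fun q => q ++ [p + row * g + col])) s
        = s.modify 0 (fun q => q ++ (PySem.List.pyRange 0 m 1).map (fun col => p + row * g + col)) := by
    intro s
    refine (PySem.List.foldl_congr_mem _ _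
        (fun s col => s.modify 0 (fun q => q ++ [p + row * g + col])) s ?_).trans
      (pv_foldl_modify_const _ 0 (fun col => p + row * g + col) s)
    intro acc x hx
    have hc : ¬ m ≤ x := not_le.mpr (PySem.List.mem_pyRange_one.mp hx).2
    simp [hrow, hc]
  have hR : ∀ s : List (List Int),
      (PySem.List.pyRange m g 1).foldl (fun qs col =>
          qs.modify ((if m ≤ row then 2 else 0) + (if m ≤ col then 1 else 0))
            (fun q => q ++ [p + row * g + col])) s
        = s.modify 1 (fun q => q ++ (PySem.List.pyRange m g 1).map (fun col => p + row * g + col)) := by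
    intro s
    refine (PySem.List.foldl_congr_mem _ _
        (fun s col => s.modify 1 (fun q => q ++ [p + row * g + col])) s ?_).trans
      (pv_foldl_modify_const _ 1 (fun col => p + row * g + col) s)
    intro acc x hx
    have hc : m ≤ x := (PySem.List.mem_pyRange_one.mp hx).1
    simp [hrow, hc]
  have hsplit : (PySem.List.pyRange 0 g 1).foldl (fun qs col =>
          qs.modify ((if m ≤ row then 2 else 0) + (if m ≤ col then 1 else 0))
            (fun q => q ++ [p + row * g + col])) [a, b, c, d]
      = ((PySem.List.pyRange 0 m 1) ++ (PySem.List.pyRange m g 1)).foldl (fun qs col =>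
          qs.modify ((if m ≤ row then 2 else 0) + (if m ≤ col then 1 else 0))
            (fun q => q ++ [p + row * g + col])) [a, b, c, d] := by
    rw [PySem.List.pyRange_one_append 0 m g h0 hmg]
  rw [hsplit, List.foldl_append, hL, hR]
  simp [List.modify]

-- One inner column pass, row in the BOTTOM half.
theorem pv_inner_bot (g m p row : Int) (h0 : 0 ≤ m) (hmg : m ≤ g) (hrow : m ≤ row)
    (a b c d : List Int) :
    (PySem.List.pyRange 0 g 1).foldl (fun qs col =>
        qs.modify ((if m ≤ row then 2 else 0) + (if m ≤ col then 1 else 0))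
          (fun q => q ++ [p + row * g + col])) [a, b, c, d]
      = [a, b, c ++ (PySem.List.pyRange 0 m 1).map (fun col => p + row * g + col),
         d ++ (PySem.List.pyRange m g 1).map (fun col => p + row * g + col)] := by
  have hL : ∀ s : List (List Int),
      (PySem.List.pyRange 0 m 1).foldl (fun qs col =>
          qs.modify ((if m ≤ row then 2 else 0) + (if m ≤ col then 1 else 0))
            (fun q => q ++ [p + row * g + col])) s
        = s.modify 2 (fun q => q ++ (PySem.List.pyRange 0 m 1).map (fun col => p + row * g + col)) := by
    intro s
    refine (PySem.List.foldl_congr_mem _ _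
        (fun s col => s.modify 2 (fun q => q ++ [p + row * g + col])) s ?_).trans
      (pv_foldl_modify_const _ 2 (fun col => p + row * g + col) s)
    intro acc x hx
    have hc : ¬ m ≤ x := not_le.mpr (PySem.List.mem_pyRange_one.mp hx).2
    simp [hrow, hc]
  have hR : ∀ s : List (List Int),
      (PySem.List.pyRange m g 1).foldl (fun qs col =>
          qs.modify ((if m ≤ row then 2 else 0) + (if m ≤ col then 1 else 0))
            (fun q => q ++ [p + row * g + col])) s
        = s.modify 3 (fun q => q ++ (PySem.List.pyRange m g 1).map (fun col => p + row * g + col)) := by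
    intro s
    refine (PySem.List.foldl_congr_mem _ _
        (fun s col => s.modify 3 (fun q => q ++ [p + row * g + col])) s ?_).trans
      (pv_foldl_modify_const _ 3 (fun col => p + row * g + col) s)
    intro acc x hx
    have hc : m ≤ x := (PySem.List.mem_pyRange_one.mp hx).1
    simp [hrow, hc]
  have hsplit : (PySem.List.pyRange 0 g 1).foldl (fun qs col =>
          qs.modify ((if m ≤ row then 2 else 0) + (if m ≤ col then 1 else 0))
            (fun q => q ++ [p + row * g + col])) [a, b, c, d]
      = ((PySem.List.pyRange 0 m 1) ++ (PySem.List.pyRange m g 1)).foldl (fun qs col =>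
          qs.modify ((if m ≤ row then 2 else 0) + (if m ≤ col then 1 else 0))
            (fun q => q ++ [p + row * g + col])) [a, b, c, d] := by
    rw [PySem.List.pyRange_one_append 0 m g h0 hmg]
  rw [hsplit, List.foldl_append, hL, hR]
  simp [List.modify]

-- Outer fold over a run of TOP rows.
theorem pv_rows_top (g m p : Int) (h0 : 0 ≤ m) (hmg : m ≤ g) :
    ∀ (L : List Int), (∀ r ∈ L, ¬ m ≤ r) → ∀ (a b c d : List Int),
    L.foldl (fun qs row =>
        (PySem.List.pyRange 0 g 1).foldl (fun qs col =>
          qs.modify ((if m ≤ row then 2 else 0) + (if m ≤ col then 1 else 0))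
            (fun q => q ++ [p + row * g + col])) qs) [a, b, c, d]
      = [a ++ L.flatMap (fun row => (PySem.List.pyRange 0 m 1).map (fun col => p + row * g + col)),
         b ++ L.flatMap (fun row => (PySem.List.pyRange m g 1).map (fun col => p + row * g + col)),
         c, d] := by
  intro L
  induction L with
  | nil => intro _ a b c d; simp
  | cons r L ih =>
      intro hL a b c d
      rw [List.foldl_cons, pv_inner_top g m p r h0 hmg (hL r (by simp)),
          ih (fun x hx => hL x (by simp [hx]))]
      simp

-- Outer fold over a run of BOTTOM rows.
theorem pv_rows_bot (g m p : Int) (h0 : 0 ≤ m) (hmg : m ≤ g) :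
    ∀ (L : List Int), (∀ r ∈ L, m ≤ r) → ∀ (a b c d : List Int),
    L.foldl (fun qs row =>
        (PySem.List.pyRange 0 g 1).foldl (fun qs col =>
          qs.modify ((if m ≤ row then 2 else 0) + (if m ≤ col then 1 else 0))
            (fun q => q ++ [p + row * g + col])) qs) [a, b, c, d]
      = [a, b,
         c ++ L.flatMap (fun row => (PySem.List.pyRange 0 m 1).map (fun col => p + row * g + col)),
         d ++ L.flatMap (fun row => (PySem.List.pyRange m g 1).map (fun col => p + row * g + col))] := by
  intro L
  induction L with
  | nil => intro _ a b c d; simp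
  | cons r L ih =>
      intro hL a b c d
      rw [List.foldl_cons, pv_inner_bot g m p r h0 hmg (hL r (by simp)),
          ih (fun x hx => hL x (by simp [hx]))]
      simp

theorem pv_rect_ne_nil (p g r0 r1 c0 c1 : Int) (h1 : r0 < r1) (h2 : c0 < c1) :
    pvRect p g r0 r1 c0 c1 ≠ [] := by
  rw [pvRect, PySem.List.pyRange_one_cons h1, PySem.List.pyRange_one_cons h2]
  simp

theorem infer_spatial_quadrant_groups_py_spec : Claim_equal_infer_spatial_quadrant_groups_py := by
  intro n _ _
  unfold Spec_infer_spatial_quadrant_groups_py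
  unfold infer_spatial_quadrant_groups_py infer_spatial_quadrant_groups_py_alt
  cases hpg : infer_patch_grid_py n with
  | none => rfl
  | some pg =>
      obtain ⟨p, g⟩ := pg
      by_cases hg : g < 2
      · simp [hg]
      · simp only [hg, if_false]
        set m := PySem.Int.floordiv g 2 with hm
        have hm' : m = g / 2 := by
          rw [hm, PySem.Int.floordiv_eq_ediv_of_pos (by omega)]
        have h1m : 1 ≤ m := by omega
        have hmg : m < g := by omega
        refine Prod.ext rfl ?_
        simp only
        have hsplit : PySem.List.pyRange 0 g 1 = PySem.List.pyRange 0 m 1 ++ PySem.List.pyRange m g 1 :=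
          PySem.List.pyRange_one_append 0 m g (by omega) (by omega)
        have hfold := congrArg (fun L : List Int => L.foldl (fun qs row =>
              (PySem.List.pyRange 0 g 1).foldl (fun qs col =>
                qs.modify ((if m ≤ row then 2 else 0) + (if m ≤ col then 1 else 0))
                  (fun q => q ++ [p + row * g + col])) qs) ([[], [], [], []] : List (List Int))) hsplit
        simp only at hfold
        rw [hfold, List.foldl_append]
        rw [pv_rows_top g m p (by omega) (by omega) _
              (fun r hr => not_le.mpr (PySem.List.mem_pyRange_one.mp hr).2)]
        rw [pv_rows_bot g m p (by omega) (by omega) _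
              (fun r hr => (PySem.List.mem_pyRange_one.mp hr).1)]
        have f0 : (pvRect p g 0 m 0 m).isEmpty = false := by
          simp [pv_rect_ne_nil p g 0 m 0 m (by omega) (by omega)]
        have f1 : (pvRect p g 0 m m g).isEmpty = false := by
          simp [pv_rect_ne_nil p g 0 m m g (by omega) (by omega)]
        have f2 : (pvRect p g m g 0 m).isEmpty = false := by
          simp [pv_rect_ne_nil p g m g 0 m (by omega) (by omega)]
        have f3 : (pvRect p g m g m g).isEmpty = false := by
          simp [pv_rect_ne_nil p g m g m g (by omega) (by omega)]
        simp only [List.nil_append]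
        show List.filter _ [pvRect p g 0 m 0 m, pvRect p g 0 m m g,
              pvRect p g m g 0 m, pvRect p g m g m g] = _
        simp [f0, f1, f2, f3]
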